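-- pv_equiv track=rewrite | github.com/shhuan1989/algorithms | codeforces/126B.py | solve_hash
-- ===== SOURCE A (Python) =====
-- def solve_hash(s):
--     MOD = 10**9+7
--     N = len(s)
--     ha, hb = 0, 0
--     possible = []
--     x, oa = 1, ord('a')
--     w = [ord(v)-oa for v in s]
--     for i, v in enumerate(w):
--         ha = (ha * 26 + v) % MOD
--         hb = (w[N-i-1] * x + hb) % MOD
--         x = (x * 26) % MOD
--         if ha == hb:
--             possible.append((i+1))
--
--     def check(m):
--         l = possible[m]
--         t = s.find(s[:l], 1)
--         return t > 0 and t != N-l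
--
--     lo, hi = 0, len(possible)
--     while lo <= hi:
--         m = (lo + hi) // 2
--         if check(m):
--             lo = m + 1
--         else:
--             hi = m - 1
--
--     return s[:possible[hi]] if hi >= 0 else 'Just a legend'
-- ===== SOURCE B (Python) =====
-- def solve_hash(s):
--     MOD = 10**9 + 7
--     N = len(s)
--     w = [ord(c) - 97 for c in s]
--     pre = [0] * (N + 1)          # pre[l] = rolling hash of s[:l]
--     for i in range(N):
--         pre[i + 1] = (pre[i] * 26 + w[i]) % MOD
--     suf = [0] * (N + 1)          # suf[l] = rolling hash of s[N-l:]
--     p26 = 1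
--     for l in range(1, N + 1):
--         suf[l] = (w[N - l] * p26 + suf[l - 1]) % MOD
--         p26 = (p26 * 26) % MOD
--     for l in range(N, 0, -1):
--         if pre[l] == suf[l] and any(s[p:p + l] == s[:l] for p in range(1, N - l)):
--             return s[:l]
--     return 'Just a legend'
-- ===== Notes on version B (the rewrite author's own statement) =====
-- stated objective: alternative
-- what changed: B keeps A's rolling-hash candidate lengths but replaces A's selection phase - repeated s.find calls driven by a binary search over the candidate list - by one descending scan over the lengths with a direct slice comparison for an interior occurrence.
-- outside the precondition, e.g. on solve_hash(''): A raises IndexError, B returns 'Just a legend'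
import Mathlib
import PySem

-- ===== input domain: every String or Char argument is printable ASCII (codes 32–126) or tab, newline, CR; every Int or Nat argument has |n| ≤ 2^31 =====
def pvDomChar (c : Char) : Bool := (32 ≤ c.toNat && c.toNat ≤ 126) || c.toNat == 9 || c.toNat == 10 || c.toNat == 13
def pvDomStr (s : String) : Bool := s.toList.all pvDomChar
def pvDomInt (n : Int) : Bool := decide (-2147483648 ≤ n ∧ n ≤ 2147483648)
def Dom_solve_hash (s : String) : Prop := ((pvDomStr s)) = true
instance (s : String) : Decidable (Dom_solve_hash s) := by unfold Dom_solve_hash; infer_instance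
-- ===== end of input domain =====

-- B replaces A's repeated s.find + binary search over the candidate lengths by one descending scan
-- with a direct slice comparison (objective: alternative/simpler selection; same hash-based candidates).

-- ===== PORT A =====
def pvCheckA (s : String) (possible : List Int) (m : Int) : Bool :=
  let l := PySem.List.pyGetD possible m 0
  let t := PySem.Str.findFrom s (PySem.Str.slice s none (some l)) 1 none
  decide (0 < t) && decide (t ≠ PySem.Str.len s - l)

def pvBsearchA (s : String) (possible : List Int) : Nat → Int → Int → Int
  | 0, _, hi => hi          -- fuel exhausted; never reached when fuel ≥ (hi + 1 - lo).toNat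
  | fuel + 1, lo, hi =>
    if lo ≤ hi then
      let m := PySem.Int.floordiv (lo + hi) 2
      if pvCheckA s possible m then pvBsearchA s possible fuel (m + 1) hi
      else pvBsearchA s possible fuel lo (m - 1)
    else hi

-- A raises IndexError on s = "" (possible is empty and check indexes possible[0]); that input is
-- outside Pre_, so possible[m] is rendered total with pyGetD (always in range on admitted inputs).
def solve_hash (s : String) : String :=
  let N : Int := PySem.Str.len s
  let w := s.toList.map fun v => (v.toNat : Int) - 97   -- ord(v) - ord('a')
  let r := (PySem.List.enumerate w 0).foldl
    (fun st iv =>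
      let ha := PySem.Int.mod (st.1 * 26 + iv.2) 1000000007
      let hb := PySem.Int.mod (PySem.List.pyGetD w (N - iv.1 - 1) 0 * st.2.2.1 + st.2.1) 1000000007
      let x := PySem.Int.mod (st.2.2.1 * 26) 1000000007
      (ha, hb, x, if ha == hb then st.2.2.2 ++ [iv.1 + 1] else st.2.2.2))
    ((0 : Int), (0 : Int), (1 : Int), ([] : List Int))
  let possible := r.2.2.2
  let hi := pvBsearchA s possible (possible.length + 1) 0 (possible.length : Int)
  if 0 ≤ hi then PySem.Str.slice s none (some (PySem.List.pyGetD possible hi 0))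
  else "Just a legend"

-- ===== PORT B =====
def pvPowB : Nat → Int
  | 0 => 1
  | l + 1 => PySem.Int.mod (pvPowB l * 26) 1000000007

def pvPreB (w : List Int) : Nat → Int
  | 0 => 0
  | i + 1 => PySem.Int.mod (pvPreB w i * 26 + PySem.List.pyGetD w (i : Int) 0) 1000000007

def pvSufB (w : List Int) (N : Int) : Nat → Int
  | 0 => 0
  | l + 1 => PySem.Int.mod (PySem.List.pyGetD w (N - (l : Int) - 1) 0 * pvPowB l + pvSufB w N l) 1000000007

-- the loop condition of B's descending scan
def pvCondB (s : String) (w : List Int) (N : Int) (l : Int) : Bool :=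
  (pvPreB w l.toNat == pvSufB w N l.toNat)
    && (PySem.List.pyRange 1 (N - l) 1).any
        (fun p => PySem.Str.slice s (some p) (some (p + l)) == PySem.Str.slice s none (some l))

def pvScanB (s : String) (w : List Int) (N : Int) : List Int → String
  | [] => "Just a legend"
  | l :: ls =>
    if pvCondB s w N l then PySem.Str.slice s none (some l)
    else pvScanB s w N ls

def solve_hash_alt (s : String) : String :=
  let N : Int := PySem.Str.len s
  let w := s.toList.map fun c => (c.toNat : Int) - 97
  pvScanB s w N (PySem.List.pyRange N 0 (-1))

-- ===== PRECONDITION & SPEC =====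
-- Pre_ excludes exactly s = "", on which A raises IndexError (possible is empty, check(0) indexes it).
def Pre_solve_hash (s : String) : Prop := s ≠ ""
instance (s : String) : Decidable (Pre_solve_hash s) := by unfold Pre_solve_hash; infer_instance
def pvWitness_solve_hash : String := "abacaba"

def Spec_solve_hash (s : String) (out : String) : Prop := out = solve_hash_alt s
instance (s : String) (out : String) : Decidable (Spec_solve_hash s out) := by unfold Spec_solve_hash; infer_instance

-- ===== CLAIM (what is proved, stated in full; the proofs are below) =====
def Claim_equal_solve_hash : Prop := ∀ (s : String), Dom_solve_hash s → Pre_solve_hash s → Spec_solve_hash s (solve_hash s)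

-- ===== LEMMAS AND PROOFS =====

-- interior occurrence of the length-l prefix: at some position p with 1 ≤ p and p + l < length
def pvOcc (cs : List Char) (l : Nat) : Prop :=
  ∃ p : Nat, 1 ≤ p ∧ p + l < cs.length ∧ cs.take l <+: cs.drop p

-- the list `possible` after the whole loop of A, in closed form
def pvPoss (w : List Int) (N : Int) (n : Nat) : List Int :=
  ((List.range n).filter (fun i => pvPreB w (i + 1) == pvSufB w N (i + 1))).map (fun i : Nat => ((i : Int) + 1))

lemma mem_pvPoss {w : List Int} {N : Int} {n : Nat} {l : Int} :
    l ∈ pvPoss w N n ↔ ∃ i : Nat, i < n ∧ pvPreB w (i + 1) = pvSufB w N (i + 1) ∧ l = (i : Int) + 1 := by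
  simp [pvPoss, List.mem_filter, List.mem_range, beq_iff_eq]
  constructor
  · rintro ⟨i, ⟨hi, hc⟩, rfl⟩; exact ⟨i, hi, hc, rfl⟩
  · rintro ⟨i, hi, hc, rfl⟩; exact ⟨i, ⟨hi, hc⟩, rfl⟩

lemma pairwise_pvPoss (w : List Int) (N : Int) (n : Nat) : (pvPoss w N n).Pairwise (· < ·) := by
  apply List.Pairwise.map (fun i : Nat => (i : Int) + 1) (R := (· < ·)) (S := (· < ·))
  · intro a b h
    omega
  · exact (List.pairwise_lt_range).filter _

lemma powB_closed (l : Nat) : pvPowB l = 26 ^ l % 1000000007 := by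
  induction l with
  | zero => rfl
  | succ l ih =>
    rw [pvPowB, ih, PySem.Int.mod_eq_emod_of_pos (by norm_num), pow_succ]
    conv_rhs => rw [Int.mul_emod]
    norm_num

lemma occ_mono {cs : List Char} {l l' : Nat} (h : l' ≤ l) (ho : pvOcc cs l) : pvOcc cs l' := by
  obtain ⟨p, h1, h2, h3⟩ := ho
  refine ⟨p, h1, by omega, ?_⟩
  have : cs.take l' = (cs.take l).take l' := by rw [List.take_take, Nat.min_eq_left h]
  rw [this]
  exact (List.take_prefix _ _).trans h3

lemma preB_closed (w : List Int) (l : Nat) :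
    pvPreB w l = (∑ j ∈ Finset.range l, w.getD j 0 * 26 ^ (l - 1 - j)) % 1000000007 := by
  induction l with
  | zero => simp [pvPreB]
  | succ l ih =>
    rw [pvPreB, ih, PySem.Int.mod_eq_emod_of_pos (by norm_num), PySem.List.pyGetD_natCast]
    have hsum : (∑ j ∈ Finset.range l, w.getD j 0 * 26 ^ (l - 1 - j)) * 26
        = ∑ j ∈ Finset.range l, w.getD j 0 * 26 ^ (l + 1 - 1 - j) := by
      rw [Finset.sum_mul]
      refine Finset.sum_congr rfl ?_
      intro j hj
      have hj' : j < l := Finset.mem_range.mp hj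
      rw [mul_assoc, ← pow_succ]
      congr 2
      omega
    calc ((∑ j ∈ Finset.range l, w.getD j 0 * 26 ^ (l - 1 - j)) % 1000000007 * 26 + w.getD l 0) % 1000000007
        = ((∑ j ∈ Finset.range l, w.getD j 0 * 26 ^ (l - 1 - j)) * 26 + w.getD l 0) % 1000000007 := by
          conv_rhs => rw [Int.add_emod, Int.mul_emod]
          conv_lhs => rw [Int.add_emod, Int.mul_emod, Int.emod_emod_of_dvd _ (dvd_refl _)]
      _ = (∑ j ∈ Finset.range (l + 1), w.getD j 0 * 26 ^ (l + 1 - 1 - j)) % 1000000007 := by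
          rw [Finset.sum_range_succ, ← hsum]
          have h0 : l + 1 - 1 - l = 0 := by omega
          rw [h0, pow_zero, mul_one]

lemma sufB_closed (w : List Int) {l : Nat} (hl : l ≤ w.length) :
    pvSufB w (w.length : Int) l = (∑ j ∈ Finset.range l, w.getD (w.length - 1 - j) 0 * 26 ^ j) % 1000000007 := by
  induction l with
  | zero => simp [pvSufB]
  | succ l ih =>
    have hl' : l ≤ w.length := by omega
    have hidx : (w.length : Int) - (l : Int) - 1 = ((w.length - 1 - l : Nat) : Int) := by
      omega
    rw [pvSufB, ih hl', PySem.Int.mod_eq_emod_of_pos (by norm_num), powB_closed, hidx,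
      PySem.List.pyGetD_natCast, Finset.sum_range_succ]
    conv_rhs => rw [Int.add_emod, Int.mul_emod (w.getD (w.length - 1 - l) 0) (26 ^ l)]
    conv_lhs => rw [Int.add_emod, Int.mul_emod (w.getD (w.length - 1 - l) 0) (26 ^ l % 1000000007),
      Int.emod_emod_of_dvd _ (dvd_refl _)]
    rw [Int.emod_emod_of_dvd _ (dvd_refl _), add_comm]

lemma cond_full (w : List Int) : pvPreB w w.length = pvSufB w (w.length : Int) w.length := by
  rw [preB_closed, sufB_closed w (le_refl _)]
  congr 1
  rw [← Finset.sum_range_reflect (fun j => w.getD (w.length - 1 - j) 0 * 26 ^ j) w.length]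
  refine Finset.sum_congr rfl ?_
  intro j hj
  have hj' : j < w.length := Finset.mem_range.mp hj
  congr 2
  omega

lemma checkA_iff {s : String} {possible : List Int} {m : Int} {l : Nat}
    (hget : PySem.List.pyGetD possible m 0 = (l : Int))
    (h1 : 1 ≤ l) (h2 : l ≤ s.toList.length) :
    pvCheckA s possible m = true ↔ pvOcc s.toList l := by
  have hN : 1 ≤ s.toList.length := le_trans h1 h2
  have hsub : (PySem.Str.slice s none (some (l : Int))).toList = s.toList.take l := by
    rw [PySem.Str.toList_slice, PySem.Chars.slice_eq_listSlice, PySem.List.slice_to_natCast]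
  have hlen : PySem.Str.len s = (s.toList.length : Int) := PySem.Str.len_eq s
  have hone : (1 : Int) = ((1 : Nat) : Int) := rfl
  simp only [pvCheckA]
  rw [hget, PySem.Str.findFrom_eq, hsub, hone,
    PySem.Chars.findFrom_natCast s.toList (s.toList.take l) 1 hN, hlen]
  have htl : (s.toList.take l).length = l := by
    rw [List.length_take]; omega
  by_cases hf : PySem.Chars.find (s.toList.drop 1) (s.toList.take l) = -1
  · rw [if_pos hf]
    simp only [Bool.and_eq_true, decide_eq_true_iff]
    constructor
    · rintro ⟨h0, -⟩; omega
    · rintro ⟨p, hp1, hpl, hpre⟩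
      exfalso
      have hinf : s.toList.take l <:+: s.toList.drop 1 := by
        have hdd : (s.toList.drop 1).drop (p - 1) = s.toList.drop p := by
          rw [List.drop_drop]; congr 1; omega
        have : s.toList.take l <:+: (s.toList.drop 1).drop (p - 1) := by
          rw [hdd]; exact hpre.isInfix
        exact this.trans (List.drop_suffix _ _).isInfix
      rw [PySem.Chars.find_eq_neg_one_iff] at hf
      exact hf hinf
  · rw [if_neg hf]
    have hge : 0 ≤ PySem.Chars.find (s.toList.drop 1) (s.toList.take l) := by
      have := PySem.Chars.neg_one_le_find (s.toList.drop 1) (s.toList.take l)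
      omega
    obtain ⟨hpre, hmin⟩ := PySem.Chars.find_spec hge
    set j := (PySem.Chars.find (s.toList.drop 1) (s.toList.take l)).toNat with hj
    have hjf : PySem.Chars.find (s.toList.drop 1) (s.toList.take l) = (j : Int) := by omega
    have hdd : (s.toList.drop 1).drop j = s.toList.drop (1 + j) := List.drop_drop ▸ rfl
    rw [hdd] at hpre
    have hjl : 1 + j + l ≤ s.toList.length := by
      have := hpre.length_le
      rw [htl, List.length_drop] at this
      omega
    simp only [Bool.and_eq_true, decide_eq_true_iff]
    rw [hjf]
    constructor
    · rintro ⟨-, hne⟩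
      refine ⟨1 + j, by omega, by omega, hpre⟩
    · rintro ⟨p, hp1, hpl, hpre'⟩
      have hjp : ¬ (p - 1 < j) := by
        intro hc
        refine hmin (p - 1) hc ?_
        have : (s.toList.drop 1).drop (p - 1) = s.toList.drop p := by
          rw [List.drop_drop]; congr 1; omega
        rw [this]
        exact hpre'
      constructor
      · omega
      · omega

lemma anyB_iff {s : String} {l : Nat} (h2 : l ≤ s.toList.length) :
    ((PySem.List.pyRange 1 ((s.toList.length : Int) - (l : Int)) 1).any
      (fun p => PySem.Str.slice s (some p) (some (p + (l : Int))) == PySem.Str.slice s none (some (l : Int))) = true)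
    ↔ pvOcc s.toList l := by
  have htl : (s.toList.take l).length = l := by rw [List.length_take]; omega
  rw [List.any_eq_true]
  constructor
  · rintro ⟨p, hp, heq⟩
    rw [PySem.List.mem_pyRange_one] at hp
    have hp0 : 0 ≤ p := by omega
    rw [beq_iff_eq] at heq
    have hlists := congrArg String.toList heq
    rw [PySem.Str.toList_slice, PySem.Str.toList_slice, PySem.Chars.slice_eq_listSlice,
      PySem.Chars.slice_eq_listSlice, PySem.List.slice_toNat _ hp0 (by omega),
      PySem.List.slice_to_natCast] at hlists
    have harg : (p + (l : Int)).toNat - p.toNat = l := by omega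
    rw [harg] at hlists
    refine ⟨p.toNat, by omega, by omega, ?_⟩
    rw [List.prefix_iff_eq_take, htl]
    exact hlists.symm
  · rintro ⟨p, hp1, hpl, hpre⟩
    refine ⟨(p : Int), ?_, ?_⟩
    · rw [PySem.List.mem_pyRange_one]; omega
    · rw [beq_iff_eq, ← String.toList_inj]
      rw [PySem.Str.toList_slice, PySem.Str.toList_slice, PySem.Chars.slice_eq_listSlice,
        PySem.Chars.slice_eq_listSlice, PySem.List.slice_toNat _ (by positivity) (by positivity),
        PySem.List.slice_to_natCast]
      have harg : ((p : Int) + (l : Int)).toNat - ((p : Int)).toNat = l := by omega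
      rw [harg, Int.toNat_natCast]
      rw [List.prefix_iff_eq_take, htl] at hpre
      exact hpre.symm

lemma pvLoopA_gen (w : List Int) (N : Int) :
    ∀ (d k : Nat) (acc : List Int), k + d = w.length →
      ((PySem.List.enumerate (w.drop k) k).foldl
        (fun st iv =>
          let ha := PySem.Int.mod (st.1 * 26 + iv.2) 1000000007
          let hb := PySem.Int.mod (PySem.List.pyGetD w (N - iv.1 - 1) 0 * st.2.2.1 + st.2.1) 1000000007
          let x := PySem.Int.mod (st.2.2.1 * 26) 1000000007
          (ha, hb, x, if ha == hb then st.2.2.2 ++ [iv.1 + 1] else st.2.2.2))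
        (pvPreB w k, pvSufB w N k, pvPowB k, acc))
      = (pvPreB w w.length, pvSufB w N w.length, pvPowB w.length,
         acc ++ ((List.range' k d).filter (fun i => pvPreB w (i + 1) == pvSufB w N (i + 1))).map (fun i : Nat => ((i : Int) + 1))) := by
  intro d
  induction d with
  | zero =>
    intro k acc hk
    have hdrop : w.drop k = [] := by
      apply List.drop_eq_nil_of_le; omega
    have hkk : k = w.length := by omega
    subst hkk
    rw [hdrop]
    simp [PySem.List.enumerate]
  | succ d ih =>
    intro k acc hk
    have hklt : k < w.length := by omega
    rw [List.drop_eq_getElem_cons hklt, PySem.List.enumerate_cons, List.foldl_cons]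
    have hgetd : PySem.List.pyGetD w ((k : Nat) : Int) 0 = w[k] := by
      rw [PySem.List.pyGetD_natCast, List.getD_eq_getElem?_getD, List.getElem?_eq_getElem hklt,
        Option.getD_some]
    have hstep :
        (let ha := PySem.Int.mod (pvPreB w k * 26 + w[k]) 1000000007
         let hb := PySem.Int.mod (PySem.List.pyGetD w (N - (k : Int) - 1) 0 * pvPowB k + pvSufB w N k) 1000000007
         let x := PySem.Int.mod (pvPowB k * 26) 1000000007
         ((ha, hb, x, if ha == hb then acc ++ [(k : Int) + 1] else acc) : Int × Int × Int × List Int))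
        = (pvPreB w (k + 1), pvSufB w N (k + 1),  pvPowB (k + 1),
            if pvPreB w (k + 1) == pvSufB w N (k + 1) then acc ++ [(k : Int) + 1] else acc) := by
      show ((PySem.Int.mod (pvPreB w k * 26 + w[k]) 1000000007, _, _, _) : Int × Int × Int × List Int) = _
      rw [show PySem.Int.mod (pvPreB w k * 26 + w[k]) 1000000007 = pvPreB w (k + 1) by
        rw [pvPreB, hgetd]]
      rfl
    dsimp only
    rw [hstep]
    have hcast : ((k : Int) + 1) = (((k + 1 : Nat)) : Int) := by push_cast; ring
    rw [hcast, ih (k + 1) _ (by omega)]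
    rw [List.range'_succ, List.filter_cons]
    by_cases hc : (pvPreB w (k + 1) == pvSufB w N (k + 1)) = true
    · rw [if_pos hc, if_pos hc]
      simp
    · rw [if_neg hc, if_neg hc]

lemma loopA_full (w : List Int) (N : Int) :
    ((PySem.List.enumerate w 0).foldl
      (fun st iv =>
        let ha := PySem.Int.mod (st.1 * 26 + iv.2) 1000000007
        let hb := PySem.Int.mod (PySem.List.pyGetD w (N - iv.1 - 1) 0 * st.2.2.1 + st.2.1) 1000000007
        let x := PySem.Int.mod (st.2.2.1 * 26) 1000000007
        (ha, hb, x, if ha == hb then st.2.2.2 ++ [iv.1 + 1] else st.2.2.2))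
      ((0 : Int), (0 : Int), (1 : Int), ([] : List Int)))
    = (pvPreB w w.length, pvSufB w N w.length, pvPowB w.length, pvPoss w N w.length) := by
  have h := pvLoopA_gen w N w.length 0 [] (by omega)
  rw [List.drop_zero] at h
  simpa [pvPoss, List.range_eq_range', pvPreB, pvSufB, pvPowB] using h

lemma scanB_eq_find? (s : String) (w : List Int) (N : Int) :
    ∀ ls : List Int, pvScanB s w N ls
      = ((ls.find? (pvCondB s w N)).map (fun l => PySem.Str.slice s none (some l))).getD "Just a legend" := by
  intro ls
  induction ls with
  | nil => rfl
  | cons l ls ih =>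
    rw [pvScanB, List.find?_cons]
    by_cases hc : pvCondB s w N l = true
    · rw [if_pos hc, hc]; rfl
    · rw [if_neg hc, Bool.not_eq_true] at *
      rw [hc, ih]

lemma find?_desc {p : Int → Bool} {a : Int} :
    ∀ {xs : List Int}, xs.Pairwise (· > ·) → a ∈ xs → p a = true →
      (∀ b ∈ xs, a < b → p b = false) → xs.find? p = some a := by
  intro xs
  induction xs with
  | nil => intro _ h; exact absurd h (List.not_mem_nil)
  | cons x xs ih =>
    intro hpw hmem hpa hfalse
    rcases List.mem_cons.mp hmem with rfl | hmem'
    · rw [List.find?_cons, hpa]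
    · have hax : a < x := (List.pairwise_cons.mp hpw).1 a hmem'
      have hpx : p x = false := hfalse x List.mem_cons_self hax
      rw [List.find?_cons, hpx]
      exact ih (List.pairwise_cons.mp hpw).2 hmem' hpa
        (fun b hb hab => hfalse b (List.mem_cons_of_mem x hb) hab)

lemma bsearch_inv (s : String) (possible : List Int)
    (hmono : ∀ i j : Int, 0 ≤ i → i ≤ j → j < (possible.length : Int) →
      pvCheckA s possible j = true → pvCheckA s possible i = true)
    (hlast : pvCheckA s possible ((possible.length : Int) - 1) = false)
    (hlen : 1 ≤ (possible.length : Int)) :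
    ∀ (fuel : Nat) (lo hi : Int), (hi + 1 - lo).toNat ≤ fuel → 0 ≤ lo → lo ≤ hi + 1 →
      hi ≤ (possible.length : Int) →
      (∀ m : Int, 0 ≤ m → m < lo → pvCheckA s possible m = true) →
      (∀ m : Int, hi < m → m < (possible.length : Int) → pvCheckA s possible m = false) →
      (-1 ≤ pvBsearchA s possible fuel lo hi ∧ pvBsearchA s possible fuel lo hi < (possible.length : Int) ∧
        (∀ m : Int, 0 ≤ m → m ≤ pvBsearchA s possible fuel lo hi → pvCheckA s possible m = true) ∧
        (∀ m : Int, pvBsearchA s possible fuel lo hi < m → m < (possible.length : Int) → pvCheckA s possible m = false)) := by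
  intro fuel
  induction fuel with
  | zero =>
    intro lo hi hfuel hlo0 hlohi hhi htrue hfalse
    have hterm : lo = hi + 1 := by omega
    have hlole : lo ≤ (possible.length : Int) := by
      by_contra hc
      have h1 : pvCheckA s possible ((possible.length : Int) - 1) = true :=
        htrue _ (by omega) (by omega)
      rw [hlast] at h1
      exact absurd h1 (by simp)
    rw [pvBsearchA]
    exact ⟨by omega, by omega, fun m hm0 hmle => htrue m hm0 (by omega),
      fun m hm hmlt => hfalse m (by omega) hmlt⟩
  | succ fuel ih =>
    intro lo hi hfuel hlo0 hlohi hhi htrue hfalse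
    have hlole : lo ≤ (possible.length : Int) - 1 := by
      by_contra hc
      have h1 : pvCheckA s possible ((possible.length : Int) - 1) = true :=
        htrue _ (by omega) (by omega)
      rw [hlast] at h1
      exact absurd h1 (by simp)
    rw [pvBsearchA]
    by_cases hle : lo ≤ hi
    · rw [if_pos hle]
      obtain ⟨hm1, hm2⟩ := PySem.Int.floordiv_two_mid_bounds hle
      set m := PySem.Int.floordiv (lo + hi) 2 with hm
      have hmlt : m < (possible.length : Int) := by
        rw [hm, PySem.Int.floordiv_lt_iff_lt_mul (by norm_num)]
        omega
      dsimp only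
      by_cases hc : pvCheckA s possible m = true
      · rw [if_pos hc]
        exact ih (m + 1) hi (by omega) (by omega) (by omega) hhi
          (fun m' hm0 hmlt' => hmono m' m hm0 (by omega) hmlt hc)
          hfalse
      · rw [if_neg hc]
        have hcf : pvCheckA s possible m = false := by
          rw [Bool.not_eq_true] at hc; exact hc
        exact ih lo (m - 1) (by omega) hlo0 (by omega) (by omega) htrue
          (fun m' hm' hmlt' => by
            by_cases hceq : pvCheckA s possible m' = true
            · exact absurd (hmono m m' (by omega) (by omega) hmlt' hceq) (by rw [hcf]; simp)
            · rw [Bool.not_eq_true] at hceq; exact hceq)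
    · rw [if_neg hle]
      exact ⟨by omega, by omega, fun m hm0 hmle => htrue m hm0 (by omega),
        fun m hm hmlt => hfalse m (by omega) hmlt⟩

-- ===== VERDICT (by name: the statement is the Claim_ definition above) =====
theorem solve_hash_spec : Claim_equal_solve_hash := by
  intro s _hdom hpre
  unfold Spec_solve_hash
  have hnil : s.toList ≠ [] := fun h => hpre (String.toList_inj.mp (by rw [h]; rfl))
  have hn : 1 ≤ s.toList.length := by
    rcases Nat.eq_zero_or_pos s.toList.length with h0 | h1
    · exact absurd (List.eq_nil_of_length_eq_zero h0) hnil
    · exact h1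
  have hN : PySem.Str.len s = (s.toList.length : Int) := PySem.Str.len_eq s
  simp only [solve_hash, solve_hash_alt]
  rw [loopA_full]
  dsimp only
  simp only [List.length_map]
  set n := s.toList.length with hnn
  set w := s.toList.map (fun v : Char => (v.toNat : Int) - 97) with hw
  set P := pvPoss w (PySem.Str.len s) n with hP
  have hwlen : w.length = n := by rw [hw, hnn]; simp
  have hcondN : pvPreB w n = pvSufB w (PySem.Str.len s) n := by
    have h := cond_full w
    rw [hwlen] at h
    rw [hN]
    exact h
  have hmemN : ((n : Int)) ∈ P := by
    rw [hP]
    refine mem_pvPoss.mpr ⟨n - 1, by omega, ?_, by omega⟩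
    rw [Nat.sub_add_cancel hn]
    exact hcondN
  have hPne : P ≠ [] := List.ne_nil_of_mem hmemN
  have hlenP : 1 ≤ P.length := by
    rcases P with _ | ⟨a, t⟩
    · exact absurd rfl hPne
    · simp
  have hbnd : ∀ l ∈ P, 1 ≤ l ∧ l ≤ (n : Int) := by
    intro l hl
    obtain ⟨i, hi, -, rfl⟩ := mem_pvPoss.mp (hP ▸ hl)
    omega
  have hpw : P.Pairwise (· < ·) := hP ▸ pairwise_pvPoss w (PySem.Str.len s) n
  have hget : ∀ idx : Nat, ∀ h : idx < P.length, PySem.List.pyGetD P (idx : Int) 0 = P[idx] := by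
    intro idx h
    rw [PySem.List.pyGetD_natCast, List.getD_eq_getElem?_getD, List.getElem?_eq_getElem h,
      Option.getD_some]
  have hgelem_mono : ∀ i j : Nat, ∀ hi : i < P.length, ∀ hj : j < P.length, i < j → P[i] < P[j] :=
    fun i j hi hj hij => List.pairwise_iff_getElem.mp hpw i j hi hj hij
  have hchk : ∀ idx : Nat, ∀ h : idx < P.length,
      (pvCheckA s P (idx : Int) = true ↔ pvOcc s.toList (P[idx].toNat)) := by
    intro idx h
    have hb := hbnd P[idx] (List.getElem_mem h)
    exact checkA_iff (by rw [hget idx h]; exact (Int.toNat_of_nonneg (by omega)).symm)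
      (by omega) (by omega)
  have hlastidx : ∀ h : P.length - 1 < P.length, P[P.length - 1] = (n : Int) := by
    intro h
    obtain ⟨i0, hi0, hv⟩ := List.mem_iff_getElem.mp hmemN
    by_cases hio : i0 = P.length - 1
    · simp only [hio] at hv
      exact hv
    · exfalso
      have hlt := hgelem_mono i0 (P.length - 1) hi0 h (by omega)
      have := (hbnd P[P.length - 1] (List.getElem_mem h)).2
      omega
  have hlastF : pvCheckA s P ((P.length : Int) - 1) = false := by
    have hcast : ((P.length : Int) - 1) = ((P.length - 1 : Nat) : Int) := by omega
    rw [hcast]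
    apply Bool.eq_false_iff.mpr
    intro hc
    rw [hchk (P.length - 1) (by omega)] at hc
    rw [hlastidx (by omega)] at hc
    obtain ⟨p, hp1, hpl, -⟩ := hc
    rw [Int.toNat_natCast] at hpl
    omega
  have hmono : ∀ i j : Int, 0 ≤ i → i ≤ j → j < (P.length : Int) →
      pvCheckA s P j = true → pvCheckA s P i = true := by
    intro i j hi hij hjl hcj
    have hiN : i.toNat < P.length := by omega
    have hjN : j.toNat < P.length := by omega
    have hieq : (i.toNat : Int) = i := Int.toNat_of_nonneg hi
    have hjeq : (j.toNat : Int) = j := Int.toNat_of_nonneg (by omega)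
    rw [← hieq, hchk _ hiN]
    rw [← hjeq, hchk _ hjN] at hcj
    refine occ_mono ?_ hcj
    rcases Nat.lt_or_ge i.toNat j.toNat with hlt | hge
    · have := hgelem_mono _ _ hiN hjN hlt
      omega
    · have heq : i.toNat = j.toNat := by omega
      simp only [heq]
      exact le_rfl
  have hbs := bsearch_inv s P hmono hlastF (by omega) (P.length + 1) 0 (P.length : Int)
    (by omega) (by omega) (by omega) (by omega)
    (fun m hm0 hml => absurd hml (by omega))
    (fun m hm hml => absurd hm (by omega))
  set r := pvBsearchA s P (P.length + 1) 0 (P.length : Int) with hr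
  obtain ⟨hr1, hr2, hrT, hrF⟩ := hbs
  rw [scanB_eq_find?]
  have hcondB_iff : ∀ b : Int, 0 < b → b ≤ (n : Int) →
      (pvCondB s w (PySem.Str.len s) b = true ↔
        (pvPreB w b.toNat = pvSufB w (PySem.Str.len s) b.toNat ∧ pvOcc s.toList b.toNat)) := by
    intro b hb0 hbn
    unfold pvCondB
    rw [Bool.and_eq_true, beq_iff_eq]
    refine and_congr Iff.rfl ?_
    have hbcast : b = ((b.toNat : Nat) : Int) := (Int.toNat_of_nonneg (by omega)).symm
    conv_lhs => rw [hN, hbcast]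
    exact anyB_iff (by omega)
  have hcondB_mem : ∀ b : Int, 0 < b → b ≤ (n : Int) →
      pvCondB s w (PySem.Str.len s) b = true →
      ∃ mb : Nat, ∃ h : mb < P.length, P[mb] = b ∧ pvCheckA s P ((mb : Nat) : Int) = true := by
    intro b h0 hn' hcb
    obtain ⟨hhash, hocc⟩ := (hcondB_iff b h0 hn').mp hcb
    have hbP : b ∈ P := by
      rw [hP]
      refine mem_pvPoss.mpr ⟨b.toNat - 1, by omega, ?_, by omega⟩
      rw [Nat.sub_add_cancel (by omega)]
      exact hhash
    obtain ⟨mb, hmb, hvb⟩ := List.mem_iff_getElem.mp hbP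
    exact ⟨mb, hmb, hvb, (hchk mb hmb).mpr (by rw [hvb]; exact hocc)⟩
  have hrange_pw : (PySem.List.pyRange (PySem.Str.len s) 0 (-1)).Pairwise (· > ·) := by
    rw [PySem.List.pyRange_neg_one_eq_reverse, List.pairwise_reverse]
    exact (PySem.List.pairwise_lt_pyRange_one 1 (PySem.Str.len s + 1)).imp (fun h => h)
  by_cases hr0 : 0 ≤ r
  · rw [if_pos hr0]
    have hrN : r.toNat < P.length := by omega
    have hrcast : (r.toNat : Int) = r := Int.toNat_of_nonneg hr0
    have hchkr : pvCheckA s P ((r.toNat : Nat) : Int) = true := by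
      rw [hrcast]
      exact hrT r hr0 le_rfl
    have hoccr : pvOcc s.toList (P[r.toNat].toNat) := (hchk _ hrN).mp hchkr
    have hlb := hbnd P[r.toNat] (List.getElem_mem hrN)
    have hcondstar : pvCondB s w (PySem.Str.len s) P[r.toNat] = true := by
      rw [hcondB_iff P[r.toNat] (by omega) (by omega)]
      refine ⟨?_, hoccr⟩
      obtain ⟨i, hi, hcnd, hval⟩ := mem_pvPoss.mp (List.getElem_mem hrN)
      have hiv : P[r.toNat].toNat = i + 1 := by omega
      rw [hiv]
      exact hcnd
    have hbig : ∀ b ∈ PySem.List.pyRange (PySem.Str.len s) 0 (-1), P[r.toNat] < b →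
        pvCondB s w (PySem.Str.len s) b = false := by
      intro b hb hlt
      rw [PySem.List.mem_pyRange_neg_one, hN] at hb
      apply Bool.eq_false_iff.mpr
      intro hcb
      obtain ⟨mb, hmb, hvb, hchkmb⟩ := hcondB_mem b (by omega) (by omega) hcb
      have hmbgt : r.toNat < mb := by
        rcases Nat.lt_or_ge r.toNat mb with hx | hx
        · exact hx
        · exfalso
          rcases Nat.lt_or_ge mb r.toNat with hy | hy
          · have := hgelem_mono mb r.toNat hmb hrN hy
            rw [hvb] at this
            omega
          · have hz : mb = r.toNat := by omega
            simp only [hz] at hvb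
            omega
      have hfalse := hrF (mb : Int) (by omega) (by omega)
      rw [hchkmb] at hfalse
      exact Bool.noConfusion hfalse
    have hfind : (PySem.List.pyRange (PySem.Str.len s) 0 (-1)).find?
        (pvCondB s w (PySem.Str.len s)) = some P[r.toNat] := by
      refine find?_desc hrange_pw ?_ hcondstar hbig
      rw [PySem.List.mem_pyRange_neg_one, hN]
      omega
    rw [hfind]
    have hgetr : PySem.List.pyGetD P r 0 = P[r.toNat] := by
      conv_lhs => rw [← hrcast]
      exact hget r.toNat hrN
    rw [hgetr]
    rfl
  · rw [if_neg hr0]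
    have hnone : (PySem.List.pyRange (PySem.Str.len s) 0 (-1)).find?
        (pvCondB s w (PySem.Str.len s)) = none := by
      rw [List.find?_eq_none]
      intro b hb hcb
      rw [PySem.List.mem_pyRange_neg_one, hN] at hb
      obtain ⟨mb, hmb, hvb, hchkmb⟩ := hcondB_mem b (by omega) (by omega) hcb
      have hfalse := hrF (mb : Int) (by omega) (by omega)
      rw [hchkmb] at hfalse
      exact Bool.noConfusion hfalse
    rw [hnone]
    rfl
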